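-- pv_equiv track=rewrite | github.com/AryanResham/eMunim | layoutLM model/layoutLM_SROIE_training.py | find_exact_spans
-- ===== SOURCE A (Python) =====
-- def find_exact_spans(words, entity_tokens):
--     spans = []
--     n = len(entity_tokens)
--
--     if n == 0 or n > len(words):
--         return spans
--
--     for i in range(len(words) - n + 1):
--         if words[i:i+n] == entity_tokens:
--             spans.append((i, i + n - 1))
--
--     return spans
-- ===== SOURCE B (Python) =====
-- MOD = 2305843009213693951  # 2^61 - 1
-- BASE = 1000003
--
--
-- def _token_hash(w):
--     h = 0
--     for c in w:
--         h = (h * 257 + ord(c) + 1) % MOD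
--     return h
--
--
-- def find_exact_spans(words, entity_tokens):
--     # Rabin-Karp over token hashes: roll a window hash and verify only on hash hits.
--     n = len(entity_tokens)
--     m = len(words)
--     if n == 0 or n > m:
--         return []
--     hw = [_token_hash(w) for w in words]
--     target = 0
--     for t in entity_tokens:
--         target = (target * BASE + _token_hash(t)) % MOD
--     p = 1
--     for _ in range(n - 1):
--         p = p * BASE % MOD
--     cur = 0
--     for x in hw[:n]:
--         cur = (cur * BASE + x) % MOD
--     spans = []
--     for i in range(m - n + 1):
--         if cur == target and words[i:i+n] == entity_tokens:
--             spans.append((i, i + n - 1))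
--         if i + n < m:
--             cur = ((cur - hw[i] * p) * BASE + hw[i + n]) % MOD
--     return spans
-- ===== Notes on version B (the rewrite author's own statement) =====
-- stated objective: alternative
-- what changed: B replaces A's per-position slice comparison by Rabin-Karp: it hashes each token once, rolls a window hash across the token sequence, and performs the full slice comparison only on hash hits.
import Mathlib
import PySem

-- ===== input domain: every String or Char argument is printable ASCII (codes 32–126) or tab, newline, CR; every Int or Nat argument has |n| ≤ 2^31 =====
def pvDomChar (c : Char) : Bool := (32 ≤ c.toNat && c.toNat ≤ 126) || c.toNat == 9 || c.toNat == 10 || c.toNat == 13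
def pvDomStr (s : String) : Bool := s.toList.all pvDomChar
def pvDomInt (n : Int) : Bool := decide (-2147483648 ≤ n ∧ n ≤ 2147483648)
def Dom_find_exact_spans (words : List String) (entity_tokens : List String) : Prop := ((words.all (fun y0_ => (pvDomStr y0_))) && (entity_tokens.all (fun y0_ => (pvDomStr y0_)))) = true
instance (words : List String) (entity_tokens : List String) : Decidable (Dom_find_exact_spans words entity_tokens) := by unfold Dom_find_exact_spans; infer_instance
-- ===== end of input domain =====

-- B replaces A's slice comparison at every start index by Rabin–Karp rolling token hashes
-- (verify only on hash hits): an alternative algorithm with the same exact result.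

-- ===== PORT A =====
-- for i in range(len(words) - n + 1): if words[i:i+n] == entity_tokens: spans.append((i, i+n-1))
def aLoop (words entity_tokens : List String) (n : Int) :
    List Int → List (Int × Int) → List (Int × Int)
  | [], spans => spans
  | i :: rest, spans =>
    if PySem.List.slice words (some i) (some (i + n)) = entity_tokens then
      aLoop words entity_tokens n rest (spans ++ [(i, i + n - 1)])
    else
      aLoop words entity_tokens n rest spans

def find_exact_spans (words : List String) (entity_tokens : List String) : List (Int × Int) :=
  let n : Int := entity_tokens.length
  if n = 0 ∨ (words.length : Int) < n then []
  else aLoop words entity_tokens n (PySem.List.pyRange 0 ((words.length : Int) - n + 1) 1) []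

-- ===== PORT B =====
def pvMOD : Int := 2305843009213693951
def pvBASE : Int := 1000003

-- h = (h * 257 + ord(c) + 1) % MOD over the characters of w
def tokenHash (w : String) : Int :=
  w.toList.foldl (fun h c => PySem.Int.mod (h * 257 + (c.toNat : Int) + 1) pvMOD) 0

-- the main loop of Source B: rolls `cur` across the token-hash windows, verifies on hash hits
def bLoop (words entity_tokens : List String) (n m : Int) (hw : List Int) (target p : Int) :
    List Int → Int → List (Int × Int) → List (Int × Int)
  | [], _, spans => spans
  | i :: rest, cur, spans =>
    let spans' :=
      if cur = target ∧ PySem.List.slice words (some i) (some (i + n)) = entity_tokens then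
        spans ++ [(i, i + n - 1)]
      else spans
    let cur' :=
      if i + n < m then
        -- hw[i] and hw[i+n] are always in range here; the default 0 is unreachable
        PySem.Int.mod ((cur - PySem.List.pyGetD hw i 0 * p) * pvBASE + PySem.List.pyGetD hw (i + n) 0) pvMOD
      else cur
    bLoop words entity_tokens n m hw target p rest cur' spans'

def find_exact_spans_alt (words : List String) (entity_tokens : List String) : List (Int × Int) :=
  let n : Int := entity_tokens.length
  let m : Int := words.length
  if n = 0 ∨ m < n then []
  else
    let hw := words.map tokenHash
    let target := entity_tokens.foldl (fun a t => PySem.Int.mod (a * pvBASE + tokenHash t) pvMOD) 0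
    let p := (PySem.List.pyRange 0 (n - 1) 1).foldl (fun q _ => PySem.Int.mod (q * pvBASE) pvMOD) 1
    let cur := (PySem.List.slice hw none (some n)).foldl (fun a x => PySem.Int.mod (a * pvBASE + x) pvMOD) 0
    bLoop words entity_tokens n m hw target p (PySem.List.pyRange 0 (m - n + 1) 1) cur []

-- ===== PRECONDITION & SPEC =====
def Spec_find_exact_spans (words : List String) (entity_tokens : List String) (out : List (Int × Int)) : Prop := out = find_exact_spans_alt words entity_tokens
instance (words : List String) (entity_tokens : List String) (out : List (Int × Int)) : Decidable (Spec_find_exact_spans words entity_tokens out) := by unfold Spec_find_exact_spans; infer_instance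

-- ===== CLAIM (what is proved, stated in full; the proofs are below) =====
def Claim_equal_find_exact_spans : Prop := ∀ (words : List String) (entity_tokens : List String), Dom_find_exact_spans words entity_tokens → Spec_find_exact_spans words entity_tokens (find_exact_spans words entity_tokens)

-- ===== LEMMAS AND PROOFS =====

def pvMODn : Nat := 2305843009213693951

def hStep (a x : Int) : Int := PySem.Int.mod (a * pvBASE + x) pvMOD

def fH (l : List Int) : Int := l.foldl hStep 0

def bz : ZMod pvMODn := (pvBASE : ZMod pvMODn)

def gZ (a : ZMod pvMODn) (l : List Int) : ZMod pvMODn :=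
  l.foldl (fun b x => b * bz + (x : ZMod pvMODn)) a

lemma pvMOD_cast : pvMOD = ((pvMODn : Nat) : Int) := by norm_num [pvMOD, pvMODn]

lemma pvMOD_pos : (0 : Int) < pvMOD := by norm_num [pvMOD]

lemma cast_mod (y : Int) : ((PySem.Int.mod y pvMOD : Int) : ZMod pvMODn) = (y : ZMod pvMODn) := by
  rw [PySem.Int.mod_eq_emod_of_pos pvMOD_pos, pvMOD_cast]
  exact_mod_cast ZMod.intCast_mod y pvMODn

lemma cast_hStep (a x : Int) : ((hStep a x : Int) : ZMod pvMODn) = ↑a * bz + ↑x := by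
  rw [hStep, cast_mod]
  push_cast
  rfl

lemma gZ_cons (a : ZMod pvMODn) (x : Int) (l : List Int) :
    gZ a (x :: l) = gZ (a * bz + ↑x) l := rfl

lemma cast_foldl (l : List Int) (a : Int) :
    ((l.foldl hStep a : Int) : ZMod pvMODn) = gZ ↑a l := by
  induction l generalizing a with
  | nil => rfl
  | cons x l ih =>
      rw [List.foldl_cons, ih, gZ_cons, cast_hStep]

lemma gZ_shift (l : List Int) (a : ZMod pvMODn) : gZ a l = a * bz ^ l.length + gZ 0 l := by
  induction l generalizing a with
  | nil => simp [gZ]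
  | cons x l ih =>
      rw [gZ_cons, ih, gZ_cons, ih (0 * bz + ↑x)]
      rw [List.length_cons, pow_succ]
      ring

lemma gZ_snoc (a : ZMod pvMODn) (l : List Int) (y : Int) :
    gZ a (l ++ [y]) = gZ a l * bz + ↑y := by
  simp [gZ, List.foldl_append]

lemma cast_powLoop (l : List Int) (a : Int) :
    ((l.foldl (fun q _ => PySem.Int.mod (q * pvBASE) pvMOD) a : Int) : ZMod pvMODn)
      = ↑a * bz ^ l.length := by
  induction l generalizing a with
  | nil => simp
  | cons x l ih =>
      rw [List.foldl_cons, ih, cast_mod, List.length_cons, pow_succ]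
      push_cast
      ring_nf
      rfl

lemma foldl_hStep_bounds (l : List Int) (a : Int) (ha : 0 ≤ a ∧ a < pvMOD) :
    0 ≤ l.foldl hStep a ∧ l.foldl hStep a < pvMOD := by
  induction l generalizing a with
  | nil => exact ha
  | cons x l ih =>
      rw [List.foldl_cons]
      exact ih _ ⟨PySem.Int.mod_nonneg _ pvMOD_pos, PySem.Int.mod_lt _ pvMOD_pos⟩

lemma fH_bounds (l : List Int) : 0 ≤ fH l ∧ fH l < pvMOD := by
  exact foldl_hStep_bounds l 0 ⟨le_refl 0, pvMOD_pos⟩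

lemma int_eq_of_cast (a b : Int) (ha : 0 ≤ a ∧ a < pvMOD) (hb : 0 ≤ b ∧ b < pvMOD)
    (h : (a : ZMod pvMODn) = (b : ZMod pvMODn)) : a = b := by
  rw [ZMod.intCast_eq_intCast_iff'] at h
  have h2 : a % ((pvMODn : Nat) : Int) = b % ((pvMODn : Nat) : Int) := h
  rw [← pvMOD_cast, Int.emod_eq_of_lt ha.1 ha.2, Int.emod_eq_of_lt hb.1 hb.2] at h2
  exact h2

lemma roll (T : List Int) (x y p : Int) (hp : (p : ZMod pvMODn) = bz ^ T.length) :
    PySem.Int.mod ((fH (x :: T) - x * p) * pvBASE + y) pvMOD = fH (T ++ [y]) := by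
  have hb1 := fH_bounds (T ++ [y])
  apply int_eq_of_cast _ _ ⟨PySem.Int.mod_nonneg _ pvMOD_pos, PySem.Int.mod_lt _ pvMOD_pos⟩ hb1
  rw [cast_mod]
  have hfx : ((fH (x :: T) : Int) : ZMod pvMODn) = ↑x * bz ^ T.length + gZ 0 T := by
    rw [fH, cast_foldl, Int.cast_zero, gZ_cons, gZ_shift]
    ring
  have hfr : ((fH (T ++ [y]) : Int) : ZMod pvMODn) = gZ 0 T * bz + ↑y := by
    rw [fH, cast_foldl, Int.cast_zero, gZ_snoc]
  rw [hfr]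
  push_cast
  rw [hfx, hp]
  have hbz : ((pvBASE : Int) : ZMod pvMODn) = bz := rfl
  rw [hbz]
  ring

lemma window_cons (hw : List Int) (j N1 : Nat) (hj : j < hw.length) :
    (hw.drop j).take (N1 + 1) = hw[j] :: (hw.drop (j + 1)).take N1 := by
  rw [List.drop_eq_getElem_cons hj, List.take_succ_cons]

lemma window_snoc (hw : List Int) (j N1 : Nat) (h : j + 1 + N1 < hw.length) :
    (hw.drop (j + 1)).take (N1 + 1) = (hw.drop (j + 1)).take N1 ++ [hw[j + 1 + N1]] := by
  rw [List.take_add_one]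
  have h1 : (hw.drop (j + 1))[N1]? = some hw[j + 1 + N1] := by
    rw [List.getElem?_drop]
    exact List.getElem?_eq_getElem h
  rw [h1]
  rfl

lemma loop_eq (words ets : List String) (N1 : Nat) (hN : ets.length = N1 + 1)
    (hNM : N1 + 1 ≤ words.length) (p : Int) (hp : (p : ZMod pvMODn) = bz ^ N1) :
    ∀ (fuel j : Nat) (spans : List (Int × Int)), j + fuel = words.length - N1 →
    bLoop words ets (ets.length : Int) (words.length : Int) (words.map tokenHash)
        (fH (ets.map tokenHash)) p
        (PySem.List.pyRange (j : Int) ((words.length : Int) - (ets.length : Int) + 1) 1)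
        (fH (((words.map tokenHash).drop j).take ets.length)) spans
      = aLoop words ets (ets.length : Int)
        (PySem.List.pyRange (j : Int) ((words.length : Int) - (ets.length : Int) + 1) 1) spans := by
  intro fuel
  induction fuel with
  | zero =>
      intro j spans hj
      rw [PySem.List.pyRange_one_eq_nil (by push_cast [hN]; omega)]
      rfl
  | succ fuel ih =>
      intro j spans hj
      have hlt : (j : Int) < (words.length : Int) - (ets.length : Int) + 1 := by
        push_cast [hN]; omega
      rw [PySem.List.pyRange_one_cons hlt]
      simp only [aLoop, bLoop]
      have hslice : PySem.List.slice words (some (j : Int)) (some ((j : Int) + (ets.length : Int)))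
          = (words.drop j).take ets.length := PySem.List.slice_natCast_add words j ets.length
      have hwin : ∀ k : Nat, (((words.map tokenHash).drop k).take ets.length)
          = ((words.drop k).take ets.length).map tokenHash := by
        intro k; simp [List.map_drop, List.map_take]
      have hcast1 : ((j : Int) + 1) = ((j + 1 : Nat) : Int) := by push_cast; ring
      have hlen : (words.map tokenHash).length = words.length := by simp
      have hjw : j < (words.map tokenHash).length := by omega
      have hrest : ∀ sp : List (Int × Int),
          bLoop words ets (ets.length : Int) (words.length : Int) (words.map tokenHash)
            (fH (ets.map tokenHash)) p
            (PySem.List.pyRange ((j : Int) + 1) ((words.length : Int) - (ets.length : Int) + 1) 1)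
            (if (j : Int) + (ets.length : Int) < (words.length : Int) then
              PySem.Int.mod
                ((fH (((words.map tokenHash).drop j).take ets.length)
                    - PySem.List.pyGetD (words.map tokenHash) (j : Int) 0 * p) * pvBASE
                  + PySem.List.pyGetD (words.map tokenHash) ((j : Int) + (ets.length : Int)) 0) pvMOD
            else fH (((words.map tokenHash).drop j).take ets.length)) sp
          = aLoop words ets (ets.length : Int)
            (PySem.List.pyRange ((j : Int) + 1) ((words.length : Int) - (ets.length : Int) + 1) 1) sp := by
        intro sp
        by_cases hlast : j + ets.length < words.length
        · -- not the last iteration: the rolling update maintains the window-hash invariant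
          rw [if_pos (by omega : (j : Int) + (ets.length : Int) < (words.length : Int))]
          have h2 : j + 1 + N1 < (words.map tokenHash).length := by omega
          have hidx : ((j : Int) + (ets.length : Int)) = ((j + 1 + N1 : Nat) : Int) := by
            push_cast [hN]; ring
          rw [hidx, PySem.List.pyGetD_natCast, PySem.List.pyGetD_natCast,
            List.getD_eq_getElem _ 0 hjw, List.getD_eq_getElem _ 0 h2]
          have hT : (((words.map tokenHash).drop (j + 1)).take N1).length = N1 := by
            simp only [List.length_take, List.length_drop, hlen]
            omega
          rw [hN, window_cons (words.map tokenHash) j N1 hjw,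
            roll _ _ _ p (by rw [hT]; exact hp),
            ← window_snoc (words.map tokenHash) j N1 h2]
          rw [hcast1]
          have := ih (j + 1) sp (by omega)
          rw [hN] at this
          exact this
        · have hfuel0 : fuel = 0 := by omega
          rw [hcast1, PySem.List.pyRange_one_eq_nil (by push_cast [hN]; omega)]
          rfl
      rw [hslice]
      have hcond : (fH (((words.map tokenHash).drop j).take ets.length) = fH (ets.map tokenHash)
          ∧ (words.drop j).take ets.length = ets) ↔ ((words.drop j).take ets.length = ets) :=
        ⟨fun h => h.2, fun h => ⟨by rw [hwin, h], h⟩⟩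
      by_cases hS : (words.drop j).take ets.length = ets
      · rw [if_pos hS, if_pos (hcond.mpr hS)]
        exact hrest _
      · rw [if_neg hS, if_neg (fun h => hS (hcond.mp h))]
        exact hrest _

lemma ab_eq (words ets : List String) : find_exact_spans words ets = find_exact_spans_alt words ets := by
  simp only [find_exact_spans, find_exact_spans_alt]
  by_cases h : (ets.length : Int) = 0 ∨ (words.length : Int) < (ets.length : Int)
  · rw [if_pos h, if_pos h]
  · rw [if_neg h, if_neg h]
    push Not at h
    obtain ⟨N1, hN⟩ : ∃ k, ets.length = k + 1 := ⟨ets.length - 1, by omega⟩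
    have hNM : N1 + 1 ≤ words.length := by omega
    have hpv : (((PySem.List.pyRange 0 ((ets.length : Int) - 1) 1).foldl
        (fun q _ => PySem.Int.mod (q * pvBASE) pvMOD) 1 : Int) : ZMod pvMODn) = bz ^ N1 := by
      rw [cast_powLoop, PySem.List.length_pyRange_one]
      have h1 : ((ets.length : Int) - 1 - 0).toNat = N1 := by omega
      rw [h1, Int.cast_one, one_mul]
    have htarget : ets.foldl (fun a t => PySem.Int.mod (a * pvBASE + tokenHash t) pvMOD) 0
        = fH (ets.map tokenHash) := by
      rw [fH, List.foldl_map]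
      rfl
    have hcur : (PySem.List.slice (words.map tokenHash) none (some (ets.length : Int))).foldl
        (fun a x => PySem.Int.mod (a * pvBASE + x) pvMOD) 0
        = fH ((words.map tokenHash).take ets.length) := by
      rw [PySem.List.slice_to_natCast]
      rfl
    rw [htarget, hcur]
    have key := loop_eq words ets N1 hN hNM _ hpv (words.length - N1) 0 [] (by omega)
    rw [Nat.cast_zero, List.drop_zero] at key
    exact key.symm

-- ===== VERDICT (by name: the statement is the Claim_ definition above) =====
theorem find_exact_spans_spec : Claim_equal_find_exact_spans := by
  intro words ets _
  unfold Spec_find_exact_spans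
  exact ab_eq words ets
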